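-- pv_equiv track=rewrite | github.com/miliar/Code_Jam_Webscraper | solutions_python/Problem_181/2076.py | order_string
-- ===== SOURCE A (Python) =====
-- def order_string(string):
--     current_char = string[0]
--     builder = ""
--     for char in string:
--         if char >= current_char:
--             current_char = char
--             builder = char + builder
--         else:
--             builder += char
--     return builder
-- ===== SOURCE B (Python) =====
-- def order_string(string):
--     # two-phase: build the prefix-maxima table, then partition by "char equals its prefix max"
--     prev_max = [string[0]]
--     for c in string[1:]:
--         prev_max.append(max(prev_max[-1], c))
--     highs = [c for c, m in zip(string, prev_max) if c == m]
--     lows = [c for c, m in zip(string, prev_max) if c != m]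
--     return ''.join(reversed(highs)) + ''.join(lows)
-- ===== Notes on version B (the rewrite author's own statement) =====
-- stated objective: faster
-- what changed: Replaces A's single interleaved prepend/append string-builder loop, whose repeated prepends copy the growing builder, by a two-phase computation: first materialize the prefix-maxima table, then partition the chars into highs (char equals its prefix max) and lows, and return the reversed highs followed by the lows.
import Mathlib
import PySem

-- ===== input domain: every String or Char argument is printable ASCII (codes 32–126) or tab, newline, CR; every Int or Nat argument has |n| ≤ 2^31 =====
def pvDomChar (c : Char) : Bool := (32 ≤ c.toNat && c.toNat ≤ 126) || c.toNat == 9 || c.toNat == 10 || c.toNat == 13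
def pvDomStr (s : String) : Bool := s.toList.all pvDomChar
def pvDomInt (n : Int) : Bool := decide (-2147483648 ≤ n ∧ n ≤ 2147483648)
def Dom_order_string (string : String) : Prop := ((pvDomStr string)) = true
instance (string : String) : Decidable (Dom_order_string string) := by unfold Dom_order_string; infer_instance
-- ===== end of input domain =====

-- B differs from A only in decomposition; both raise IndexError on the empty string (string[0]),
-- so Pre_ excludes exactly the empty string.

-- ===== PORT A =====
-- A: one loop over the chars keeping (current_char, builder); char ≥ current_char prepends, else appends.
def order_string (string : String) : String :=
  match string.toList with
  | [] => ""   -- Python raises IndexError at string[0]; excluded by Pre_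
  | c0 :: _ =>
    let st := string.toList.foldl
      (fun (p : Char × List Char) char =>
        if p.1 ≤ char then (char, char :: p.2) else (p.1, p.2 ++ [char]))
      (c0, [])
    String.mk st.2

-- ===== PORT B =====
-- B: build the prefix-maxima table with a fold (prev_max[-1] = getLast!), then partition by char == its prefix max.
def order_string_alt (string : String) : String :=
  match string.toList with
  | [] => ""   -- Python raises IndexError at string[0]; excluded by Pre_
  | c0 :: rest =>
    let prevMax := rest.foldl (fun (acc : List Char) c => acc ++ [max acc.getLast! c]) [c0]
    let pairs := string.toList.zip prevMax
    let highs := (pairs.filter (fun p => p.1 == p.2)).map Prod.fst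
    let lows := (pairs.filter (fun p => p.1 != p.2)).map Prod.fst
    String.mk (highs.reverse ++ lows)

-- ===== PRECONDITION & SPEC =====
-- Pre_ excludes exactly the empty string, on which A (and B) raises IndexError at string[0].
def Pre_order_string (string : String) : Prop := string ≠ ""
instance (string : String) : Decidable (Pre_order_string string) := by unfold Pre_order_string; infer_instance
def pvWitness_order_string : String := "cab"
def Spec_order_string (string : String) (out : String) : Prop := out = order_string_alt string
instance (string : String) (out : String) : Decidable (Spec_order_string string out) := by unfold Spec_order_string; infer_instance

-- ===== CLAIM (what is proved, stated in full; the proofs are below) =====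
def Claim_equal_order_string : Prop := ∀ (string : String), Dom_order_string string → Pre_order_string string → Spec_order_string string (order_string string)

-- ===== LEMMAS AND PROOFS =====

-- reference split of a char list by the running max m: (highs in order, lows in order)
def pvSplit (m : Char) : List Char → List Char × List Char
  | [] => ([], [])
  | c :: t =>
    if m ≤ c then
      let p := pvSplit c t
      (c :: p.1, p.2)
    else
      let p := pvSplit m t
      (p.1, c :: p.2)

-- reference prefix-max scan (maxima of nonempty prefixes, after seed m)
def pvScan (m : Char) : List Char → List Char
  | [] => []
  | c :: t => max m c :: pvScan (max m c) t

theorem pvA_fold (l : List Char) : ∀ (m : Char) (b : List Char),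
    (l.foldl (fun (p : Char × List Char) char =>
        if p.1 ≤ char then (char, char :: p.2) else (p.1, p.2 ++ [char])) (m, b)).2
    = (pvSplit m l).1.reverse ++ b ++ (pvSplit m l).2 := by
  induction l with
  | nil => intro m b; simp [pvSplit]
  | cons c t ih =>
    intro m b
    by_cases h : m ≤ c
    · simp only [List.foldl_cons, pvSplit, h, ih]
      simp
    · simp only [List.foldl_cons, pvSplit, h, ih]
      simp

theorem pvScan_fold (l : List Char) : ∀ (acc : List Char) (m : Char), acc ≠ [] → acc.getLast! = m →
    l.foldl (fun (acc : List Char) c => acc ++ [max acc.getLast! c]) acc = acc ++ pvScan m l := by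
  induction l with
  | nil => intro acc m _ _; simp [pvScan]
  | cons c t ih =>
    intro acc m hne hlast
    have hlast' : (acc ++ [max m c]).getLast! = max m c := by
      simp
    simp only [List.foldl_cons, hlast]
    rw [ih (acc ++ [max m c]) (max m c) (by simp) hlast']
    simp [pvScan]

theorem pvB_split (l : List Char) : ∀ (m : Char),
    (((l.zip (pvScan m l)).filter (fun p => p.1 == p.2)).map Prod.fst = (pvSplit m l).1)
    ∧ (((l.zip (pvScan m l)).filter (fun p => p.1 != p.2)).map Prod.fst = (pvSplit m l).2) := by
  induction l with
  | nil => intro m; simp [pvScan, pvSplit]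
  | cons c t ih =>
    intro m
    by_cases h : m ≤ c
    · have hmax : max m c = c := max_eq_right h
      simp [pvScan, pvSplit, hmax, h, (ih c).1, (ih c).2]
    · have hlt : c < m := lt_of_not_ge h
      have hmax : max m c = m := max_eq_left (le_of_lt hlt)
      have hne : ¬ (c = m) := ne_of_lt hlt
      simp [pvScan, pvSplit, hmax, h, hne, (ih m).1, (ih m).2]

-- ===== VERDICT (by name: the statement is the Claim_ definition above) =====
theorem order_string_spec : Claim_equal_order_string := by
  intro string _ hpre
  unfold Spec_order_string order_string order_string_alt
  cases hl : string.toList with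
  | nil =>
    exact absurd (String.toList_inj.mp (by simp [hl])) hpre
  | cons c0 rest =>
    have hfold := pvA_fold (c0 :: rest) c0 []
    have hscan := pvScan_fold rest [c0] c0 (by simp) (by simp)
    have hzip : (c0 :: rest).zip ([c0] ++ pvScan c0 rest)
        = (c0, c0) :: rest.zip (pvScan c0 rest) := by simp
    have hsplit := pvB_split rest c0
    simp only [hfold, hscan, hzip]
    simp only [pvSplit, le_refl, if_pos]
    simp [hsplit.1, hsplit.2]
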